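-- pv_equiv track=rewrite | github.com/prography-6th-study/algorithm-code | yongmin/LV1_체육복.py | solution
-- ===== SOURCE A (Python) =====
-- def solution(n, lost, reserve):
--     # 학생들의 체육복 현황
--     students = [1] * n
--     for n in lost:
--         students[n-1] -= 1
--     for n in reserve:
--         students[n-1] += 1
--
--     for i, n in enumerate(students):
--         if n != 0:
--             continue
--         # 기준에서 왼쪽부터 탐색해야 최적해가 나온다
--         if i > 0 and students[i-1] == 2:
--             students[i-1] -= 1
--             students[i] += 1
--         elif i < len(students)-1 and students[i+1] == 2:
--             students[i+1] -= 1
--             students[i] += 1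
--
--     return len(students) - students.count(0)
-- ===== SOURCE B (Python) =====
-- def solution(n, lost, reserve):
--     have = [1] * n
--     for x in lost:
--         have[x - 1] -= 1
--     for x in reserve:
--         have[x - 1] += 1
--     prev = matched = missing = 0
--     for v in have:
--         if v == 0:
--             missing += 1
--             if prev == 2:
--                 matched += 1
--                 prev = 0
--             else:
--                 prev = 1
--         elif v == 2:
--             if prev == 1:
--                 matched += 1
--                 prev = 0
--             else:
--                 prev = 2
--         else:
--             prev = 0
--     return len(have) - missing + matched
-- ===== Notes on version B (the rewrite author's own statement) =====
-- stated objective: alternative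
-- what changed: Replaces A's greedy that mutates the count array while rescanning it (lending by decrement/increment) plus a final .count(0) pass by one pure left-to-right 3-state automaton pass over the counts that tallies missing students and matches directly.
import Mathlib
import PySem

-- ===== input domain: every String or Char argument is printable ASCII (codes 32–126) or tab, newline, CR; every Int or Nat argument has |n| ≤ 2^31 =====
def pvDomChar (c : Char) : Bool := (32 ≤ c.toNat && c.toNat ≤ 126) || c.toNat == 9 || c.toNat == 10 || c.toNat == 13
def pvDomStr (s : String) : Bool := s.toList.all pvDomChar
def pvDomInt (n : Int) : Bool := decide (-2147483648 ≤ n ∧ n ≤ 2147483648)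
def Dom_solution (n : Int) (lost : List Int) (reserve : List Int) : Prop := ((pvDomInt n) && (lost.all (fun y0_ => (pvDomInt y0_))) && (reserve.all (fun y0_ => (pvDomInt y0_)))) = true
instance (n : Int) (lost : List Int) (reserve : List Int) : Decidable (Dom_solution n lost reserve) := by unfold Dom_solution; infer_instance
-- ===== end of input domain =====

-- B replaces A's greedy that mutates the count array while rescanning it (plus a final count-of-zeros
-- pass) by one pure left-to-right 3-state automaton pass over the counts (alternative decomposition, same O(n) cost).


-- ===== PORT A =====
-- Python's in-place list mutation is ported on Array (O(1) updates); exact where the index is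
-- in range after Python's negative wraparound (pyIdx?), which Pre_ guarantees.
def pySetArr (a : Array Int) (i : Int) (v : Int) : Array Int :=
  match PySem.List.pyIdx? a.size i with
  | some k => a.setIfInBounds k v
  | none => a

def pyGetArr (a : Array Int) (i : Int) (d : Int) : Int :=
  match PySem.List.pyIdx? a.size i with
  | some k => a.getD k d
  | none => d

-- the 'for i, n in enumerate(students)' loop of A, reading/mutating the current array
def scanA (s : Array Int) (i : Nat) : Array Int :=
  if h : i < s.size then
    if s.getD i 0 ≠ 0 then scanA s (i + 1)
    else if 0 < i ∧ s.getD (i - 1) 0 = 2 then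
      scanA ((s.setIfInBounds (i - 1) (s.getD (i - 1) 0 - 1)).setIfInBounds i (s.getD i 0 + 1)) (i + 1)
    else if i < s.size - 1 ∧ s.getD (i + 1) 0 = 2 then
      scanA ((s.setIfInBounds (i + 1) (s.getD (i + 1) 0 - 1)).setIfInBounds i (s.getD i 0 + 1)) (i + 1)
    else scanA s (i + 1)
  else s
termination_by s.size - i
decreasing_by all_goals (try simp only [Array.size_setIfInBounds]); all_goals omega

def solution (n : Int) (lost : List Int) (reserve : List Int) : Int :=
  let s0 : Array Int := Array.replicate n.toNat 1
  let s1 := lost.foldl (fun s x => pySetArr s (x - 1) (pyGetArr s (x - 1) 0 - 1)) s0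
  let s2 := reserve.foldl (fun s x => pySetArr s (x - 1) (pyGetArr s (x - 1) 0 + 1)) s1
  let st := scanA s2 0
  (st.size : Int) - st.toList.count 0

-- ===== PORT B =====
-- Source B builds the same per-student count list (plain list indexing) and then runs one pure
-- 3-state automaton pass over it: state = (prev, matched, missing).
def solution_alt (n : Int) (lost : List Int) (reserve : List Int) : Int :=
  let have0 : List Int := List.replicate n.toNat 1
  let h1 := lost.foldl (fun s x => PySem.List.pySetD s (x - 1) (PySem.List.pyGetD s (x - 1) 0 - 1)) have0
  let h2 := reserve.foldl (fun s x => PySem.List.pySetD s (x - 1) (PySem.List.pyGetD s (x - 1) 0 + 1)) h1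
  let res := h2.foldl
    (fun (st : Int × Int × Int) v =>
      if v = 0 then
        if st.1 = 2 then (0, st.2.1 + 1, st.2.2 + 1) else (1, st.2.1, st.2.2 + 1)
      else if v = 2 then
        if st.1 = 1 then (0, st.2.1 + 1, st.2.2) else (2, st.2.1, st.2.2)
      else (0, st.2.1, st.2.2)) (0, 0, 0)
  (h2.length : Int) - res.2.2 + res.2.1

-- ===== PRECONDITION & SPEC =====
-- Pre_ is exactly A's no-raise domain: every student number indexes the size-n list under
-- Python's negative-index rule (otherwise both A and B raise IndexError at 'have[x-1]').
def Pre_solution (n : Int) (lost : List Int) (reserve : List Int) : Prop :=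
  (∀ x ∈ lost, 1 - max n 0 ≤ x ∧ x ≤ max n 0) ∧ (∀ x ∈ reserve, 1 - max n 0 ≤ x ∧ x ≤ max n 0)
instance (n : Int) (lost : List Int) (reserve : List Int) : Decidable (Pre_solution n lost reserve) := by
  unfold Pre_solution; infer_instance

def pvWitness_solution : Int × List Int × List Int := (3, [1, 3], [2])

def Spec_solution (n : Int) (lost : List Int) (reserve : List Int) (out : Int) : Prop := out = solution_alt n lost reserve
instance (n : Int) (lost : List Int) (reserve : List Int) (out : Int) : Decidable (Spec_solution n lost reserve out) := by unfold Spec_solution; infer_instance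

-- ===== CLAIM (what is proved, stated in full; the proofs are below) =====
def Claim_equal_solution : Prop := ∀ (n : Int) (lost : List Int) (reserve : List Int), Dom_solution n lost reserve → Pre_solution n lost reserve → Spec_solution n lost reserve (solution n lost reserve)

-- ===== LEMMAS AND PROOFS =====

-- List-level restatement of A's scan, used by the proofs
def scanAL (s : List Int) (i : Nat) : List Int :=
  if h : i < s.length then
    if s.getD i 0 ≠ 0 then scanAL s (i + 1)
    else if 0 < i ∧ s.getD (i - 1) 0 = 2 then
      scanAL ((s.set (i - 1) (s.getD (i - 1) 0 - 1)).set i (s.getD i 0 + 1)) (i + 1)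
    else if i < s.length - 1 ∧ s.getD (i + 1) 0 = 2 then
      scanAL ((s.set (i + 1) (s.getD (i + 1) 0 - 1)).set i (s.getD i 0 + 1)) (i + 1)
    else scanAL s (i + 1)
  else s
termination_by s.length - i
decreasing_by all_goals (try simp only [List.length_set]); all_goals omega

theorem arr_getD_eq (a : Array Int) (j : Nat) (d : Int) : a.getD j d = a.toList.getD j d := by
  rw [Array.getD_eq_getD_getElem?, List.getD_eq_getElem?_getD, Array.getElem?_toList]

theorem toList_scanA (a : Array Int) (i : Nat) : (scanA a i).toList = scanAL a.toList i := by
  fun_induction scanA a i with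
  | case1 a i h hne ih =>
    rw [ih]
    conv_rhs => rw [scanAL]
    rw [dif_pos (show i < a.toList.length by rw [Array.length_toList]; omega),
      if_pos (show a.toList.getD i 0 ≠ 0 by rw [← arr_getD_eq]; exact hne)]
  | case2 a i h hv hc ih =>
    rw [ih]
    conv_rhs => rw [scanAL]
    rw [dif_pos (show i < a.toList.length by rw [Array.length_toList]; omega),
      if_neg (show ¬ a.toList.getD i 0 ≠ 0 by rw [← arr_getD_eq]; exact hv),
      if_pos (show 0 < i ∧ a.toList.getD (i - 1) 0 = 2 by rw [← arr_getD_eq]; exact hc)]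
    congr 1
    simp [Array.toList_setIfInBounds]
  | case3 a i h hv hc hc2 ih =>
    rw [ih]
    conv_rhs => rw [scanAL]
    rw [dif_pos (show i < a.toList.length by rw [Array.length_toList]; omega),
      if_neg (show ¬ a.toList.getD i 0 ≠ 0 by rw [← arr_getD_eq]; exact hv),
      if_neg (show ¬ (0 < i ∧ a.toList.getD (i - 1) 0 = 2) by rw [← arr_getD_eq]; exact hc),
      if_pos (show i < a.toList.length - 1 ∧ a.toList.getD (i + 1) 0 = 2 by
        rw [Array.length_toList, ← arr_getD_eq]; exact hc2)]
    congr 1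
    simp [Array.toList_setIfInBounds]
  | case4 a i h hv hc hc2 ih =>
    rw [ih]
    conv_rhs => rw [scanAL]
    rw [dif_pos (show i < a.toList.length by rw [Array.length_toList]; omega),
      if_neg (show ¬ a.toList.getD i 0 ≠ 0 by rw [← arr_getD_eq]; exact hv),
      if_neg (show ¬ (0 < i ∧ a.toList.getD (i - 1) 0 = 2) by rw [← arr_getD_eq]; exact hc),
      if_neg (show ¬ (i < a.toList.length - 1 ∧ a.toList.getD (i + 1) 0 = 2) by
        rw [Array.length_toList, ← arr_getD_eq]; exact hc2)]
  | case5 a i h =>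
    rw [scanAL, dif_neg (by rw [Array.length_toList]; omega)]

theorem toList_pySetArr (a : Array Int) (i v : Int) :
    (pySetArr a i v).toList = PySem.List.pySetD a.toList i v := by
  unfold pySetArr PySem.List.pySetD PySem.List.pySet?
  rw [← Array.length_toList]
  cases hk : PySem.List.pyIdx? a.toList.length i with
  | none => simp
  | some k => simp [Array.toList_setIfInBounds]

theorem pyGetArr_eq (a : Array Int) (i d : Int) :
    pyGetArr a i d = PySem.List.pyGetD a.toList i d := by
  unfold pyGetArr PySem.List.pyGetD PySem.List.pyGet?
  rw [← Array.length_toList]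
  cases hk : PySem.List.pyIdx? a.toList.length i with
  | none => simp
  | some k => simp

theorem toList_buildFold_sub (L : List Int) (a : Array Int) :
    (L.foldl (fun s x => pySetArr s (x - 1) (pyGetArr s (x - 1) 0 - 1)) a).toList
      = L.foldl (fun s x =>
          PySem.List.pySetD s (x - 1) (PySem.List.pyGetD s (x - 1) 0 - 1)) a.toList := by
  induction L generalizing a with
  | nil => rfl
  | cons x L ih =>
    rw [List.foldl_cons, List.foldl_cons, ih, toList_pySetArr, pyGetArr_eq]

theorem toList_buildFold_add (L : List Int) (a : Array Int) :
    (L.foldl (fun s x => pySetArr s (x - 1) (pyGetArr s (x - 1) 0 + 1)) a).toList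
      = L.foldl (fun s x =>
          PySem.List.pySetD s (x - 1) (PySem.List.pyGetD s (x - 1) 0 + 1)) a.toList := by
  induction L generalizing a with
  | nil => rfl
  | cons x L ih =>
    rw [List.foldl_cons, List.foldl_cons, ih, toList_pySetArr, pyGetArr_eq]

-- pure model of A's scan: zeros left unmatched from the current position on;
-- the Bool says "the previous position currently holds an unconsumed 2"
def gZ : List Int → Bool → Nat
  | [], _ => 0
  | [v], b => if v = 0 then (if b then 0 else 1) else 0
  | v :: w :: t, b =>
    if v = 0 then
      if b then gZ (w :: t) false
      else if w = 2 then gZ t false else 1 + gZ (w :: t) false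
    else gZ (w :: t) (decide (v = 2))

-- pure model of B's automaton: matches made from the current position on, given prev state
def mM : List Int → Int → Int
  | [], _ => 0
  | v :: t, p =>
    if v = 0 then (if p = 2 then 1 + mM t 0 else mM t 1)
    else if v = 2 then (if p = 1 then 1 + mM t 0 else mM t 2)
    else mM t 0

theorem gZ_cons_ne (v : Int) (t : List Int) (b : Bool) (h : v ≠ 0) :
    gZ (v :: t) b = gZ t (decide (v = 2)) := by
  cases t <;> simp [gZ, h]

theorem gZ_zero_avail (t : List Int) : gZ (0 :: t) true = gZ t false := by
  cases t <;> simp [gZ]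

theorem gZ_zero_two (t : List Int) : gZ (0 :: 2 :: t) false = gZ t false := by
  simp [gZ]

theorem gZ_zero_ne (w : Int) (t : List Int) (h : w ≠ 2) :
    gZ (0 :: w :: t) false = 1 + gZ (w :: t) false := by
  simp [gZ, h]

theorem scanAL_length (s : List Int) (i : Nat) : (scanAL s i).length = s.length := by
  fun_induction scanAL s i with
  | case1 s i h hne ih => exact ih
  | case2 s i h hv hc ih => simpa using ih
  | case3 s i h hv hc hc2 ih => simpa using ih
  | case4 s i h hv hc hc2 ih => exact ih
  | case5 s i h => rfl

theorem count_set_add (l : List Int) (k : Nat) (v a : Int) (hk : k < l.length) :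
    (l.set k v).count a + (if l[k] = a then 1 else 0) = l.count a + (if v = a then 1 else 0) := by
  induction l generalizing k with
  | nil => simp at hk
  | cons x t ih =>
    cases k with
    | zero =>
      simp only [List.set_cons_zero, List.count_cons, List.getElem_cons_zero, beq_iff_eq]
      split_ifs <;> omega
    | succ k =>
      have hk' : k < t.length := by simpa using hk
      simp only [List.set_cons_succ, List.count_cons, List.getElem_cons_succ, beq_iff_eq]
      have := ih k hk'
      split_ifs at this ⊢ <;> omega

theorem scanAL_count (s : List Int) (i : Nat) (hi : i ≤ s.length) :
    (scanAL s i).count 0 = (s.take i).count 0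
      + gZ (s.drop i) (decide (0 < i ∧ s.getD (i - 1) 0 = 2)) := by
  fun_induction scanAL s i with
  | case5 s i h =>
    have : i = s.length := by omega
    subst this
    simp [gZ]
  | case1 s i h hne ih =>
    rw [ih (by omega)]
    have hd : s.drop i = s[i] :: s.drop (i + 1) := List.drop_eq_getElem_cons h
    have hg : s.getD i 0 = s[i] := List.getD_eq_getElem _ _ h
    have hne' : s[i] ≠ (0:Int) := by rw [← hg]; exact hne
    have ht : (s.take (i + 1)).count 0 = (s.take i).count 0 := by
      rw [List.take_add_one, List.getElem?_eq_getElem h, Option.toList_some, List.count_append]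
      have : List.count 0 [s[i]] = 0 := by simp [hne']
      omega
    have hfl : decide (0 < i + 1 ∧ s.getD (i + 1 - 1) 0 = 2) = decide (s[i] = 2) := by
      rw [Nat.add_sub_cancel, hg]; simp
    rw [ht, hfl, hd, gZ_cons_ne _ _ _ hne']
  | case2 s i h hv hc ih =>
    obtain ⟨hipos, h2⟩ := hc
    have hv0 : s.getD i 0 = 0 := by omega
    have hgi : s[i] = (0:Int) := by rw [← List.getD_eq_getElem s 0 h]; exact hv0
    have hk1 : i - 1 < s.length := by omega
    have hgi1 : s[i-1] = (2:Int) := by rw [← List.getD_eq_getElem s 0 hk1]; exact h2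
    have e1 : s.getD (i - 1) 0 - 1 = (1:Int) := by rw [h2]; norm_num
    have e2 : s.getD i 0 + 1 = (1:Int) := by rw [hv0]; norm_num
    rw [e1, e2] at ih ⊢
    set s' := (s.set (i - 1) (1:Int)).set i 1 with hs'
    have hlen' : s'.length = s.length := by simp [hs']
    rw [ih (by omega)]
    have hgd : s'.getD (i + 1 - 1) 0 = 1 := by
      rw [Nat.add_sub_cancel, List.getD_eq_getElem?_getD, hs',
        List.getElem?_set_self (by simpa using h)]
      rfl
    have hb' : decide (0 < i + 1 ∧ s'.getD (i + 1 - 1) 0 = 2) = false := by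
      refine decide_eq_false (fun hcon => ?_)
      have := hcon.2
      omega
    have hdrop : s'.drop (i + 1) = s.drop (i + 1) := by
      rw [hs', List.drop_set, if_pos (by omega), List.drop_set, if_pos (by omega)]
    have hts : (s.take (i + 1)).count 0 = (s.take i).count 0 + 1 := by
      rw [List.take_add_one, List.getElem?_eq_getElem h, Option.toList_some, List.count_append]
      have : List.count 0 [s[i]] = 1 := by simp [hgi]
      omega
    have htake : (s'.take (i + 1)).count 0 = (s.take i).count 0 := by
      rw [hs', List.take_set, List.take_set]
      have hlt : i - 1 < (s.take (i+1)).length := by simp [List.length_take]; omega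
      have hlt2 : i < ((s.take (i+1)).set (i-1) (1:Int)).length := by
        simp [List.length_take]; omega
      have hv1 : (s.take (i+1))[i-1]'hlt = (2:Int) := by
        rw [List.getElem_take]; exact hgi1
      have hv2 : ((s.take (i+1)).set (i-1) (1:Int))[i]'hlt2 = (0:Int) := by
        rw [List.getElem_set_ne (by omega), List.getElem_take]; exact hgi
      have q1 := count_set_add (s.take (i+1)) (i-1) 1 0 hlt
      have q2 := count_set_add ((s.take (i+1)).set (i-1) (1:Int)) i 1 0 hlt2
      rw [hv1] at q1; rw [hv2] at q2
      norm_num at q1 q2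
      omega
    rw [hb', htake, hdrop]
    have hflag : decide (0 < i ∧ s.getD (i - 1) 0 = 2) = true := decide_eq_true ⟨hipos, h2⟩
    rw [hflag, List.drop_eq_getElem_cons h, hgi, gZ_zero_avail]
  | case3 s i h hv hc hc2 ih =>
    obtain ⟨hlt1, h2⟩ := hc2
    have hv0 : s.getD i 0 = 0 := by omega
    have hgi : s[i] = (0:Int) := by rw [← List.getD_eq_getElem s 0 h]; exact hv0
    have hk1 : i + 1 < s.length := by omega
    have hgi1 : s[i+1] = (2:Int) := by rw [← List.getD_eq_getElem s 0 hk1]; exact h2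
    have e1 : s.getD (i + 1) 0 - 1 = (1:Int) := by rw [h2]; norm_num
    have e2 : s.getD i 0 + 1 = (1:Int) := by rw [hv0]; norm_num
    rw [e1, e2] at ih ⊢
    set s' := (s.set (i + 1) (1:Int)).set i 1 with hs'
    have hlen' : s'.length = s.length := by simp [hs']
    rw [ih (by omega)]
    have hgd : s'.getD (i + 1 - 1) 0 = 1 := by
      rw [Nat.add_sub_cancel, List.getD_eq_getElem?_getD, hs',
        List.getElem?_set_self (by simpa using h)]
      rfl
    have hb' : decide (0 < i + 1 ∧ s'.getD (i + 1 - 1) 0 = 2) = false := by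
      refine decide_eq_false (fun hcon => ?_)
      have := hcon.2
      omega
    have hdrop : s'.drop (i + 1) = (1 : Int) :: s.drop (i + 1 + 1) := by
      rw [hs', List.drop_set, if_pos (by omega), List.drop_set, if_neg (by omega),
        Nat.sub_self, List.drop_eq_getElem_cons hk1, List.set_cons_zero]
    have hts : (s.take (i + 1)).count 0 = (s.take i).count 0 + 1 := by
      rw [List.take_add_one, List.getElem?_eq_getElem h, Option.toList_some, List.count_append]
      have : List.count 0 [s[i]] = 1 := by simp [hgi]
      omega
    have htake : (s'.take (i + 1)).count 0 = (s.take i).count 0 := by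
      rw [hs', List.take_set, List.take_set]
      have hnoop : (s.take (i+1)).set (i+1) (1:Int) = s.take (i+1) := by
        apply List.set_eq_of_length_le
        simp [List.length_take]
      rw [hnoop]
      have hlt2 : i < (s.take (i+1)).length := by simp [List.length_take]; omega
      have hv2 : (s.take (i+1))[i]'hlt2 = (0:Int) := by
        rw [List.getElem_take]; exact hgi
      have q2 := count_set_add (s.take (i+1)) i 1 0 hlt2
      rw [hv2] at q2
      norm_num at q2
      omega
    rw [hb', htake, hdrop]
    have hflag : decide (0 < i ∧ s.getD (i - 1) 0 = 2) = false := decide_eq_false hc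
    rw [hflag, List.drop_eq_getElem_cons h, hgi, List.drop_eq_getElem_cons hk1, hgi1,
      gZ_zero_two, gZ_cons_ne _ _ _ (by norm_num : (1:Int) ≠ 0)]
    norm_num
  | case4 s i h hv hc hc2 ih =>
    have hv0 : s.getD i 0 = 0 := by omega
    have hgi : s[i] = (0:Int) := by rw [← List.getD_eq_getElem s 0 h]; exact hv0
    rw [ih (by omega)]
    have hgd : s.getD (i + 1 - 1) 0 = 0 := by rw [Nat.add_sub_cancel]; exact hv0
    have hb' : decide (0 < i + 1 ∧ s.getD (i + 1 - 1) 0 = 2) = false := by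
      refine decide_eq_false (fun hcon => ?_)
      have := hcon.2
      omega
    have hts : (s.take (i + 1)).count 0 = (s.take i).count 0 + 1 := by
      rw [List.take_add_one, List.getElem?_eq_getElem h, Option.toList_some, List.count_append]
      have : List.count 0 [s[i]] = 1 := by simp [hgi]
      omega
    have hflag : decide (0 < i ∧ s.getD (i - 1) 0 = 2) = false := decide_eq_false hc
    rw [hb', hts, hflag, List.drop_eq_getElem_cons h, hgi]
    rcases hd : s.drop (i + 1) with _ | ⟨w, t⟩
    · simp [gZ]
    · have hk1 : i + 1 < s.length := by
        by_contra hcon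
        have : s.drop (i + 1) = [] := List.drop_eq_nil_of_le (by omega)
        rw [hd] at this
        exact absurd this (by simp)
      have hds := List.drop_eq_getElem_cons hk1 (l := s)
      rw [hd] at hds
      have hw : w = s[i+1] := (List.cons.inj hds).1
      have hwne : w ≠ 2 := by
        rw [hw, ← List.getD_eq_getElem s 0 hk1]
        intro hcon
        exact hc2 ⟨by omega, hcon⟩
      rw [gZ_zero_ne _ _ hwne]
      omega

theorem gZ_eq (t : List Int) (b : Bool) :
    (gZ t b : Int) = t.count 0 - mM t (if b then 2 else 0) := by
  fun_induction gZ t b <;>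
    (try simp_all [mM, List.count_cons, List.count_nil]) <;>
    (try split_ifs) <;> (try simp_all) <;> omega

set_option maxHeartbeats 1000000 in
theorem foldB :
    ∀ (L : List Int) (p m z : Int),
    ((L.foldl (fun (st : Int × Int × Int) v =>
        if v = 0 then
          if st.1 = 2 then (0, st.2.1 + 1, st.2.2 + 1) else (1, st.2.1, st.2.2 + 1)
        else if v = 2 then
          if st.1 = 1 then (0, st.2.1 + 1, st.2.2) else (2, st.2.1, st.2.2)
        else (0, st.2.1, st.2.2)) (p, m, z)).2.1
       = m + mM L p)
    ∧ ((L.foldl (fun (st : Int × Int × Int) v =>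
        if v = 0 then
          if st.1 = 2 then (0, st.2.1 + 1, st.2.2 + 1) else (1, st.2.1, st.2.2 + 1)
        else if v = 2 then
          if st.1 = 1 then (0, st.2.1 + 1, st.2.2) else (2, st.2.1, st.2.2)
        else (0, st.2.1, st.2.2)) (p, m, z)).2.2
       = z + (L.count 0 : Int)) := by
  intro L
  induction L with
  | nil => intro p m z; simp [mM]
  | cons x L ih =>
    intro p m z
    have ih1 := fun p m z => (ih p m z).1
    have ih2 := fun p m z => (ih p m z).2
    rw [List.foldl_cons]
    by_cases h0 : x = 0 <;> by_cases h2v : x = 2 <;>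
      by_cases hp2 : p = 2 <;> by_cases hp1 : p = 1 <;>
      constructor <;>
      (try simp_all [mM]) <;> omega

theorem solution_spec_aux : ∀ (n : Int) (lost : List Int) (reserve : List Int),
    solution n lost reserve = solution_alt n lost reserve := by
  intro n lost reserve
  set s1 : List Int := lost.foldl
      (fun s x => PySem.List.pySetD s (x - 1) (PySem.List.pyGetD s (x - 1) 0 - 1))
      (List.replicate n.toNat (1 : Int)) with hs1
  set s2 : List Int := reserve.foldl
      (fun s x => PySem.List.pySetD s (x - 1) (PySem.List.pyGetD s (x - 1) 0 + 1)) s1 with hs2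
  -- A's value
  have hA : solution n lost reserve = (s2.length : Int) - (s2.count 0 : Int) + mM s2 0 := by
    simp only [solution]
    set a2 : Array Int := reserve.foldl (fun s x => pySetArr s (x - 1) (pyGetArr s (x - 1) 0 + 1))
      (lost.foldl (fun s x => pySetArr s (x - 1) (pyGetArr s (x - 1) 0 - 1))
        (Array.replicate n.toNat 1)) with ha2
    have ha2l : a2.toList = s2 := by
      rw [ha2, toList_buildFold_add, toList_buildFold_sub, Array.toList_replicate]
    have htl : (scanA a2 0).toList = scanAL s2 0 := by
      rw [toList_scanA, ha2l]
    have hsz' : (scanA a2 0).size = s2.length := by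
      rw [← Array.length_toList, htl, scanAL_length]
    have hcnt : (scanAL s2 0).count 0 = gZ s2 false := by
      have := scanAL_count s2 0 (by omega)
      simpa using this
    rw [hsz', htl, hcnt]
    have hgz := gZ_eq s2 false
    simp only [Bool.false_eq_true, if_false] at hgz
    omega
  -- B's value
  have hB : solution_alt n lost reserve = (s2.length : Int) - (s2.count 0 : Int) + mM s2 0 := by
    simp only [solution_alt, ← hs1, ← hs2]
    obtain ⟨hf1, hf2⟩ := foldB s2 0 0 0
    rw [hf1, hf2]
    ring
  rw [hA, hB]
-- ===== VERDICT (by name: the statement is the Claim_ definition above) =====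
theorem solution_spec : Claim_equal_solution := by
  intro n lost reserve _ _
  exact solution_spec_aux n lost reserve
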